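-- pv_equiv track=rewrite | github.com/AxtonH/Prezo | backend/app/artifact_css_tree.py | _find_top_level_colon
-- ===== SOURCE A (Python) =====
-- def _find_top_level_colon(text: str) -> int:
--     depth_parenthesis = 0
--     depth_brackets = 0
--     index = 0
--     length = len(text)
--
--     while index < length:
--         char = text[index]
--         next_char = text[index + 1] if index + 1 < length else ""
--         if char == "/" and next_char == "*":
--             index = _advance_past_comment(text, index, length)
--             continue
--         if char in {"'", '"'}:
--             index = _advance_past_string(text, index, length)
--             continue
--         if char == "(":
--             depth_parenthesis += 1
--         elif char == ")" and depth_parenthesis > 0: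
--             depth_parenthesis -= 1
--         elif char == "[":
--             depth_brackets += 1
--         elif char == "]" and depth_brackets > 0:
--             depth_brackets -= 1
--         elif char == ":" and depth_parenthesis == 0 and depth_brackets == 0:
--             return index
--         index += 1
--     return -1
--
-- def _advance_past_comment(text: str, start_index: int, end_index: int) -> int:
--     close_index = text.find("*/", start_index + 2, end_index)
--     if close_index < 0:
--         return end_index
--     return close_index + 2
--
-- def _advance_past_string(text: str, start_index: int, end_index: int) -> int:
--     quote = text[start_index]
--     index = start_index + 1
--     while index < end_index:
--         char = text[index]
--         if char == "\\":
--             index += 2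
--             continue
--         if char == quote:
--             return index + 1
--         index += 1
--     return end_index
-- ===== SOURCE B (Python) =====
-- def _find_top_level_colon(text: str) -> int:
--     # Flat single-pass state machine (NORMAL / IN_STRING / IN_COMMENT) instead of helper-function delegation.
--     NORMAL, IN_STRING, IN_COMMENT = 0, 1, 2
--     mode = NORMAL
--     quote = ""
--     escaped = False
--     depth_parenthesis = 0
--     depth_brackets = 0
--     n = len(text)
--     i = 0
--     while i < n:
--         c = text[i]
--         if mode == IN_COMMENT:
--             if c == "*" and i + 1 < n and text[i + 1] == "/":
--                 i += 2
--                 mode = NORMAL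
--             else:
--                 i += 1
--         elif mode == IN_STRING:
--             if escaped:
--                 escaped = False
--             elif c == "\\":
--                 escaped = True
--             elif c == quote:
--                 mode = NORMAL
--             i += 1
--         else:
--             if c == "/" and i + 1 < n and text[i + 1] == "*":
--                 i += 2
--                 mode = IN_COMMENT
--             elif c == "'" or c == '"':
--                 mode = IN_STRING
--                 quote = c
--                 escaped = False
--                 i += 1
--             else:
--                 if c == "(":
--                     depth_parenthesis += 1
--                 elif c == ")" and depth_parenthesis > 0:
--                     depth_parenthesis -= 1
--                 elif c == "[":
--                     depth_brackets += 1
--                 elif c == "]" and depth_brackets > 0: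
--                     depth_brackets -= 1
--                 elif c == ":" and depth_parenthesis == 0 and depth_brackets == 0:
--                     return i
--                 i += 1
--     return -1
-- ===== Notes on version B (the rewrite author's own statement) =====
-- stated objective: alternative
-- what changed: Replaced A's helper-function delegation (separate comment-skip via str.find and string-skip loops) with one flat single-pass character loop driven by an explicit mode state machine (NORMAL/IN_STRING/IN_COMMENT) with a saved quote char and escape flag.
import Mathlib
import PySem

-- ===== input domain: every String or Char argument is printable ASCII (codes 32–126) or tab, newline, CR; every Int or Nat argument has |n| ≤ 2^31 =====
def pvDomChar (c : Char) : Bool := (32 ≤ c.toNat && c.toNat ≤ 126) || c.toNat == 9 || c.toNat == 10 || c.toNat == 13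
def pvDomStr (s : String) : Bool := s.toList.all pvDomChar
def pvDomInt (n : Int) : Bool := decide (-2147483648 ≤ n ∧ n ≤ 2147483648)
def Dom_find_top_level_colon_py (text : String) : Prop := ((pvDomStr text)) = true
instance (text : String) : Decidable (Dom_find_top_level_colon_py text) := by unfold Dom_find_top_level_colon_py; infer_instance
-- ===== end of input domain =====

-- B re-implements the same scan as one flat state machine (explicit NORMAL/IN_STRING/IN_COMMENT mode)
-- instead of A's helper-function delegation; same O(n) cost, different decomposition.

-- ===== PORT A =====
-- _advance_past_string's while-loop (quote already read); exact step-for-step transliteration.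
def pvStrLoop (cs : List Char) (quote : Char) (end_index : Int) (index : Int) : Int :=
  if h : index < end_index then
    let char := PySem.List.pyGetD cs index ' '
    if char = '\\' then pvStrLoop cs quote end_index (index + 2)
    else if char = quote then index + 1
    else pvStrLoop cs quote end_index (index + 1)
  else end_index
termination_by (end_index - index).toNat
decreasing_by all_goals omega

def pvAdvancePastString (cs : List Char) (start_index end_index : Int) : Int :=
  pvStrLoop cs (PySem.List.pyGetD cs start_index ' ') end_index (start_index + 1)

def pvAdvancePastComment (cs : List Char) (start_index end_index : Int) : Int :=
  let close_index := PySem.Chars.findFrom cs ['*', '/'] (start_index + 2) (some end_index)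
  if close_index < 0 then end_index else close_index + 2

-- A's main while-loop; fuel only makes the recursion total (one unit per iteration; the
-- index strictly increases each iteration, so fuel = length + 1 is never exhausted).
def pvALoop (cs : List Char) (length : Int) (fuel : Nat) (dp db index : Int) : Int :=
  match fuel with
  | 0 => -1
  | fuel + 1 =>
    if index < length then
      let char := PySem.List.pyGetD cs index ' '
      let next_char : Option Char :=
        if index + 1 < length then some (PySem.List.pyGetD cs (index + 1) ' ') else none
      if char = '/' ∧ next_char = some '*' then
        pvALoop cs length fuel dp db (pvAdvancePastComment cs index length)
      else if char = '\'' ∨ char = '"' then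
        pvALoop cs length fuel dp db (pvAdvancePastString cs index length)
      else if char = '(' then pvALoop cs length fuel (dp + 1) db (index + 1)
      else if char = ')' ∧ dp > 0 then pvALoop cs length fuel (dp - 1) db (index + 1)
      else if char = '[' then pvALoop cs length fuel dp (db + 1) (index + 1)
      else if char = ']' ∧ db > 0 then pvALoop cs length fuel dp (db - 1) (index + 1)
      else if char = ':' ∧ dp = 0 ∧ db = 0 then index
      else pvALoop cs length fuel dp db (index + 1)
    else -1

def find_top_level_colon_py (text : String) : Int :=
  pvALoop text.toList (text.toList.length : Int) (text.toList.length + 1) 0 0 0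

-- ===== PORT B =====
inductive PvMode where
  | normal : PvMode
  | instring : Char → Bool → PvMode
  | incomment : PvMode
deriving DecidableEq, Repr

-- Source B's single while-loop: one character step per state of the flat automaton.
def pvBLoop (rest : List Char) (pos dp db : Int) (mode : PvMode) : Int :=
  match rest, mode with
  | [], _ => -1
  | c :: t, .incomment =>
    if c = '*' ∧ t.head? = some '/' then pvBLoop t.tail (pos + 2) dp db .normal
    else pvBLoop t (pos + 1) dp db .incomment
  | c :: t, .instring q esc =>
    if esc then pvBLoop t (pos + 1) dp db (.instring q false)
    else if c = '\\' then pvBLoop t (pos + 1) dp db (.instring q true)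
    else if c = q then pvBLoop t (pos + 1) dp db .normal
    else pvBLoop t (pos + 1) dp db (.instring q esc)
  | c :: t, .normal =>
    if c = '/' ∧ t.head? = some '*' then pvBLoop t.tail (pos + 2) dp db .incomment
    else if c = '\'' ∨ c = '"' then pvBLoop t (pos + 1) dp db (.instring c false)
    else if c = '(' then pvBLoop t (pos + 1) (dp + 1) db .normal
    else if c = ')' ∧ dp > 0 then pvBLoop t (pos + 1) (dp - 1) db .normal
    else if c = '[' then pvBLoop t (pos + 1) dp (db + 1) .normal
    else if c = ']' ∧ db > 0 then pvBLoop t (pos + 1) dp (db - 1) .normal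
    else if c = ':' ∧ dp = 0 ∧ db = 0 then pos
    else pvBLoop t (pos + 1) dp db .normal
termination_by rest.length
decreasing_by all_goals (simp [List.length_tail]; try omega)

def find_top_level_colon_py_alt (text : String) : Int :=
  pvBLoop text.toList 0 0 0 .normal

-- ===== PRECONDITION & SPEC =====
def Spec_find_top_level_colon_py (text : String) (out : Int) : Prop := out = find_top_level_colon_py_alt text
instance (text : String) (out : Int) : Decidable (Spec_find_top_level_colon_py text out) := by unfold Spec_find_top_level_colon_py; infer_instance

-- ===== CLAIM (what is proved, stated in full; the proofs are below) =====
def Claim_equal_find_top_level_colon_py : Prop := ∀ (text : String), Dom_find_top_level_colon_py text → Spec_find_top_level_colon_py text (find_top_level_colon_py text)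

-- ===== LEMMAS AND PROOFS =====

-- position of the first "*/" in a list, by direct recursion (proof-side mirror of find "*/")
def pvCFind : List Char → Option Nat
  | a :: b :: t => if a = '*' ∧ b = '/' then some 0 else (pvCFind (b :: t)).map (· + 1)
  | _ => none

theorem pvCFind_some_spec : ∀ (l : List Char) (m : Nat), pvCFind l = some m →
    ['*', '/'] <+: l.drop m ∧ m + 2 ≤ l.length ∧ ∀ i < m, ¬ ['*', '/'] <+: l.drop i := by
  intro l
  induction l using pvCFind.induct with
  | case1 a b t hab =>
    intro m hm
    simp only [pvCFind, if_pos hab] at hm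
    obtain rfl : (0 : Nat) = m := by injection hm
    obtain ⟨rfl, rfl⟩ := hab
    exact ⟨by simp [List.cons_prefix_cons], by simp, by intro i hi; omega⟩
  | case2 a b t hab ih =>
    intro m hm
    simp only [pvCFind, if_neg hab, Option.map_eq_some_iff] at hm
    obtain ⟨m', hm', rfl⟩ := hm
    obtain ⟨h1, h2, h3⟩ := ih m' hm'
    refine ⟨by simpa using h1, by simp at h2 ⊢; omega, ?_⟩
    intro i hi
    match i with
    | 0 =>
      simp only [List.drop_zero]
      intro hpre
      rcases hpre with ⟨r, hr⟩
      simp at hr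
      exact hab ⟨hr.1.symm, hr.2.1.symm⟩
    | j + 1 =>
      simpa using h3 j (by omega)
  | case3 l h =>
    intro m hm
    match l, h with
    | [], _ => simp [pvCFind] at hm
    | [a], _ => simp [pvCFind] at hm
    | (a :: b :: t), h => exact absurd (h a b t rfl) (fun f => f)

theorem pvCFind_none_spec : ∀ (l : List Char), pvCFind l = none →
    ∀ i, ¬ ['*', '/'] <+: l.drop i := by
  intro l
  induction l using pvCFind.induct with
  | case1 a b t hab => intro hm; simp [pvCFind, hab] at hm
  | case2 a b t hab ih =>
    intro hm
    simp only [pvCFind, if_neg hab, Option.map_eq_none_iff] at hm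
    intro i
    match i with
    | 0 =>
      simp only [List.drop_zero]
      intro hpre
      rcases hpre with ⟨r, hr⟩
      simp at hr
      exact hab ⟨hr.1.symm, hr.2.1.symm⟩
    | j + 1 => simpa using ih hm j
  | case3 l h =>
    intro _ i hpre
    match l, h with
    | [], _ =>
      have := hpre.length_le
      simp at this
    | [a], _ =>
      have := hpre.length_le
      simp at this
      omega
    | (a :: b :: t), h => exact absurd (h a b t rfl) (fun f => f)

theorem pvCFind_eq_find (l : List Char) :
    PySem.Chars.find l ['*', '/'] = (match pvCFind l with | none => (-1 : Int) | some m => (m : Int)) := by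
  cases hc : pvCFind l with
  | none =>
    have h := pvCFind_none_spec l hc
    have : ¬ (['*', '/'] <:+: l) := by
      intro hinf
      obtain ⟨j, hj⟩ := (PySem.Chars.exists_prefix_drop_iff_isIn ['*', '/'] l).mpr
        ((PySem.Chars.isIn_iff_infix _ _).mpr hinf)
      exact h j hj
    simp [(PySem.Chars.find_eq_neg_one_iff _ _).mpr this]
  | some m =>
    obtain ⟨h1, h2, h3⟩ := pvCFind_some_spec l m hc
    have hinf : ['*', '/'] <:+: l := by
      have := (PySem.Chars.exists_prefix_drop_iff_isIn (sub := ['*', '/']) (s := l)).mp ⟨m, h1⟩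
      exact (PySem.Chars.isIn_iff_infix _ _).mp this
    have hnn : 0 ≤ PySem.Chars.find l ['*', '/'] := (PySem.Chars.find_nonneg_iff _ _).mpr hinf
    obtain ⟨hf1, hf2⟩ := PySem.Chars.find_spec hnn
    have heq : (PySem.Chars.find l ['*', '/']).toNat = m := by
      by_contra hne
      rcases Nat.lt_or_ge (PySem.Chars.find l ['*', '/']).toNat m with hlt | hge
      · exact h3 _ hlt hf1
      · exact hf2 m (by omega) h1
    simp only []
    omega

theorem pvFindFrom_some_len (s sub : List Char) (st : Int) :
    PySem.Chars.findFrom s sub st (some (s.length : Int)) = PySem.Chars.findFrom s sub st none := by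
  have h1 : ¬((s.length : Int) < (s.length : Int)) := by omega
  have h2 : ¬((s.length : Int) < 0) := by omega
  simp only [PySem.Chars.findFrom, h1, h2, if_false]

-- comment mode of B = A's find-based comment skip
theorem pvComment_lemma (cs : List Char) : ∀ (n j : Nat) (pos dp db : Int), cs.length - j ≤ n →
    pvBLoop (cs.drop j) pos dp db .incomment =
      (match pvCFind (cs.drop j) with
       | none => -1
       | some m => pvBLoop (cs.drop (j + m + 2)) (pos + m + 2) dp db .normal) := by
  intro n
  induction n with
  | zero =>
    intro j pos dp db hn
    have hj : cs.drop j = [] := List.drop_eq_nil_of_le (by omega)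
    simp [hj, pvBLoop, pvCFind]
  | succ n ih =>
    intro j pos dp db hn
    cases hd : cs.drop j with
    | nil => simp [pvBLoop, pvCFind]
    | cons c t =>
      have hjlt : j < cs.length := by
        have := congrArg List.length hd
        simp at this; omega
      have ht : t = cs.drop (j + 1) := by
        have := congrArg List.tail hd
        simpa [List.tail_drop] using this.symm
      cases hd2 : cs.drop (j + 1) with
      | nil =>
        subst ht
        rw [hd2]
        simp [pvBLoop, pvCFind]
      | cons d t2 =>
        have ht2 : t2 = cs.drop (j + 2) := by
          have := congrArg List.tail hd2
          simpa [List.tail_drop, show j + 1 + 1 = j + 2 from rfl] using this.symm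
        subst ht
        rw [hd2]
        by_cases hcd : c = '*' ∧ d = '/'
        · obtain ⟨rfl, rfl⟩ := hcd
          have hL : pvBLoop ('*' :: '/' :: t2) pos dp db .incomment
              = pvBLoop t2 (pos + 2) dp db .normal := by
            simp [pvBLoop]
          have hR : pvCFind ('*' :: '/' :: t2) = some 0 := by simp [pvCFind]
          rw [hL, hR]
          simp [← ht2]
        · have hstep : pvBLoop (c :: d :: t2) pos dp db .incomment
              = pvBLoop (d :: t2) (pos + 1) dp db .incomment := by
            have hc : ¬ (c = '*' ∧ (d :: t2).head? = some '/') := by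
              simpa using hcd
            conv_lhs => rw [pvBLoop.eq_def]
            simp only [if_neg hc]
          rw [hstep, ← hd2, ih (j + 1) (pos + 1) dp db (by omega)]
          rw [hd2]
          have hpc : pvCFind (c :: d :: t2) = (pvCFind (d :: t2)).map (· + 1) := by
            simp [pvCFind, hcd]
          rw [hpc, ← hd2]
          cases hcf : pvCFind (cs.drop (j + 1)) with
          | none => simp
          | some m' =>
            simp only [Option.map_some]
            have e1 : j + 1 + m' + 2 = j + (m' + 1) + 2 := by omega
            have e2 : pos + 1 + (m' : Int) + 2 = pos + ((m' : Nat) + 1 : Nat) + 2 := by push_cast; ring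
            rw [e1, e2]

-- string mode of B = A's _advance_past_string loop
theorem pvString_lemma (cs : List Char) (q : Char) : ∀ (n j : Nat) (dp db : Int),
    cs.length - j ≤ n → j ≤ cs.length →
    pvBLoop (cs.drop j) (j : Int) dp db (.instring q false) =
      pvBLoop (cs.drop (pvStrLoop cs q (cs.length : Int) (j : Int)).toNat)
        (pvStrLoop cs q (cs.length : Int) (j : Int)) dp db .normal := by
  intro n
  induction n with
  | zero =>
    intro j dp db hn hj
    have hjL : j = cs.length := by omega
    subst hjL
    rw [pvStrLoop.eq_def]
    simp [pvBLoop]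
  | succ n ih =>
    intro j dp db hn hj
    rcases Nat.eq_or_lt_of_le hj with hjL | hjlt
    · subst hjL
      rw [pvStrLoop.eq_def]
      simp [pvBLoop]
    · have hd : cs.drop j = cs[j] :: cs.drop (j + 1) := List.drop_eq_getElem_cons hjlt
      have hgd : PySem.List.pyGetD cs (j : Int) ' ' = cs[j] := by
        simp [PySem.List.pyGetD_natCast, List.getD, List.getElem?_eq_getElem hjlt]
      by_cases hbs : cs[j] = '\\'
      · have hr : pvStrLoop cs q (cs.length : Int) (j : Int)
            = pvStrLoop cs q (cs.length : Int) ((j : Int) + 2) := by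
          rw [pvStrLoop.eq_def]
          simp [hgd, hbs, show (j : Int) < (cs.length : Int) by exact_mod_cast hjlt]
        have hL1 : pvBLoop (cs.drop j) (j : Int) dp db (.instring q false)
            = pvBLoop (cs.drop (j + 1)) ((j : Int) + 1) dp db (.instring q true) := by
          rw [hd, pvBLoop.eq_def]
          simp [hbs]
        rcases Nat.eq_or_lt_of_le (show j + 1 ≤ cs.length from hjlt) with hjL2 | hjlt2
        · have hnil : cs.drop (j + 1) = [] := by rw [hjL2]; simp
          have hr2 : pvStrLoop cs q (cs.length : Int) ((j : Int) + 2) = (cs.length : Int) := by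
            rw [pvStrLoop.eq_def]
            have : ¬ ((j : Int) + 2 < (cs.length : Int)) := by omega
            simp [this]
          rw [hL1, hnil, hr, hr2]
          simp [pvBLoop]
        · have hd2 : cs.drop (j + 1) = cs[j + 1] :: cs.drop (j + 2) := List.drop_eq_getElem_cons hjlt2
          have hL2 : pvBLoop (cs.drop (j + 1)) ((j : Int) + 1) dp db (.instring q true)
              = pvBLoop (cs.drop (j + 2)) ((j : Int) + 2) dp db (.instring q false) := by
            rw [hd2, pvBLoop.eq_def]
            have e2 : (j : Int) + 1 + 1 = (j : Int) + 2 := by ring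
            simp [e2]
          rw [hL1, hL2, hr]
          have := ih (j + 2) dp db (by omega) (by omega)
          push_cast at this ⊢
          convert this using 3
      · by_cases hq : cs[j] = q
        · have hbq : ¬ (q = '\\') := by rw [← hq]; exact hbs
          have hr : pvStrLoop cs q (cs.length : Int) (j : Int) = (j : Int) + 1 := by
            rw [pvStrLoop.eq_def]
            simp [hgd, hq, hbq, show (j : Int) < (cs.length : Int) by exact_mod_cast hjlt]
          have hL1 : pvBLoop (cs.drop j) (j : Int) dp db (.instring q false)
              = pvBLoop (cs.drop (j + 1)) ((j : Int) + 1) dp db .normal := by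
            rw [hd, pvBLoop.eq_def]
            simp [hq, hbq]
          rw [hL1, hr]
          have : ((j : Int) + 1).toNat = j + 1 := by omega
          rw [this]
        · have hr : pvStrLoop cs q (cs.length : Int) (j : Int)
              = pvStrLoop cs q (cs.length : Int) ((j : Int) + 1) := by
            rw [pvStrLoop.eq_def]
            simp [hgd, hbs, hq, show (j : Int) < (cs.length : Int) by exact_mod_cast hjlt]
          have hL1 : pvBLoop (cs.drop j) (j : Int) dp db (.instring q false)
              = pvBLoop (cs.drop (j + 1)) ((j : Int) + 1) dp db (.instring q false) := by
            rw [hd, pvBLoop.eq_def]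
            simp [hbs, hq]
          rw [hL1, hr]
          have := ih (j + 1) dp db (by omega) (by omega)
          push_cast at this ⊢
          exact this

theorem pvStrLoop_bounds (cs : List Char) (q : Char) : ∀ (n : Nat) (idx : Int),
    ((cs.length : Int) - idx).toNat ≤ n →
    pvStrLoop cs q (cs.length : Int) idx ≤ (cs.length : Int) ∧
      (idx ≤ pvStrLoop cs q (cs.length : Int) idx ∨ pvStrLoop cs q (cs.length : Int) idx = (cs.length : Int)) := by
  intro n
  induction n with
  | zero =>
    intro idx hn
    have hge : ¬ (idx < (cs.length : Int)) := by omega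
    rw [pvStrLoop.eq_def]
    simp [hge]
  | succ n ih =>
    intro idx hn
    by_cases hlt : idx < (cs.length : Int)
    · rw [pvStrLoop.eq_def]
      simp only [dif_pos hlt]
      split_ifs with h1 h2
      · have := ih (idx + 2) (by omega)
        constructor
        · exact this.1
        · rcases this.2 with h | h
          · exact Or.inl (by omega)
          · exact Or.inr h
      · constructor
        · omega
        · exact Or.inl (by omega)
      · have := ih (idx + 1) (by omega)
        constructor
        · exact this.1
        · rcases this.2 with h | h
          · exact Or.inl (by omega)
          · exact Or.inr h
    · rw [pvStrLoop.eq_def]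
      simp [hlt]

theorem pvMain_lemma (cs : List Char) : ∀ (fuel : Nat) (p : Nat) (dp db : Int),
    p ≤ cs.length → cs.length - p < fuel →
    pvALoop cs (cs.length : Int) fuel dp db (p : Int) = pvBLoop (cs.drop p) (p : Int) dp db .normal := by
  intro fuel
  induction fuel with
  | zero => intro p dp db hp hn; omega
  | succ fuel ih =>
    intro p dp db hp hn
    rcases Nat.eq_or_lt_of_le hp with hpL | hplt
    · subst hpL
      simp [pvALoop, pvBLoop]
    · have hd : cs.drop p = cs[p] :: cs.drop (p + 1) := List.drop_eq_getElem_cons hplt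
      have hgd : PySem.List.pyGetD cs (p : Int) ' ' = cs[p] := by
        simp [PySem.List.pyGetD_natCast, List.getD, List.getElem?_eq_getElem hplt]
      have hplt' : (p : Int) < (cs.length : Int) := by exact_mod_cast hplt
      rw [pvALoop]
      simp only [if_pos hplt', hgd]
      by_cases hp1 : p + 1 < cs.length
      · have hd2 : cs.drop (p + 1) = cs[p + 1] :: cs.drop (p + 2) := List.drop_eq_getElem_cons hp1
        have hgd1 : PySem.List.pyGetD cs ((p : Int) + 1) ' ' = cs[p + 1] := by
          have hc : ((p : Int) + 1) = ((p + 1 : Nat) : Int) := by push_cast; ring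
          rw [hc, PySem.List.pyGetD_natCast]
          simp [List.getD, List.getElem?_eq_getElem hp1]
        have hp1' : (p : Int) + 1 < (cs.length : Int) := by exact_mod_cast hp1
        simp only [if_pos hp1', hgd1]
        by_cases hcd : cs[p] = '/' ∧ cs[p + 1] = '*'
        · have hcond : cs[p] = '/' ∧ (some cs[p + 1] : Option Char) = some '*' :=
            ⟨hcd.1, by rw [hcd.2]⟩
          rw [if_pos hcond]
          have hB : pvBLoop (cs.drop p) (p : Int) dp db .normal
              = pvBLoop (cs.drop (p + 2)) ((p : Int) + 2) dp db .incomment := by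
            rw [hd, pvBLoop.eq_def]
            simp [hd2, hcd]
          rw [hB, pvComment_lemma cs cs.length (p + 2) ((p : Int) + 2) dp db (by omega)]
          have hk : ((p : Int) + 2) = ((p + 2 : Nat) : Int) := by push_cast; ring
          have hfind : PySem.Chars.findFrom cs ['*', '/'] ((p : Int) + 2) (some (cs.length : Int))
              = if PySem.Chars.find (cs.drop (p + 2)) ['*', '/'] = -1 then -1
                else ((p + 2 : Nat) : Int) + PySem.Chars.find (cs.drop (p + 2)) ['*', '/'] := by
            rw [hk, pvFindFrom_some_len, PySem.Chars.findFrom_natCast cs ['*', '/'] (p + 2) (by omega)]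
          cases hcf : pvCFind (cs.drop (p + 2)) with
          | none =>
            have hf : PySem.Chars.find (cs.drop (p + 2)) ['*', '/'] = -1 := by
              rw [pvCFind_eq_find, hcf]
            have hadv : pvAdvancePastComment cs (p : Int) (cs.length : Int) = (cs.length : Int) := by
              unfold pvAdvancePastComment
              rw [hfind]
              simp [hf]
            rw [hadv, ih cs.length dp db (by omega) (by omega)]
            simp [pvBLoop]
          | some m =>
            have hspec := pvCFind_some_spec _ _ hcf
            have hlen : m + 2 ≤ cs.length - (p + 2) := by
              have h2 := hspec.2.1
              simp at h2
              omega
            have hf : PySem.Chars.find (cs.drop (p + 2)) ['*', '/'] = (m : Int) := by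
              rw [pvCFind_eq_find, hcf]
            have hadv : pvAdvancePastComment cs (p : Int) (cs.length : Int)
                = ((p + 2 + m + 2 : Nat) : Int) := by
              unfold pvAdvancePastComment
              rw [hfind]
              have hm : ¬ ((m : Int) = -1) := by omega
              have hif : ¬ (((p + 2 : Nat) : Int) + (m : Int) < 0) := by omega
              simp only [hf, if_neg hm, if_neg hif]
              push_cast; ring
            rw [hadv, ih (p + 2 + m + 2) dp db (by omega) (by omega)]
            have e : ((p + 2 + m + 2 : Nat) : Int) = (p : Int) + 2 + (m : Int) + 2 := by
              push_cast; ring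
            simp only []
            rw [e]
        · have hcond : ¬ (cs[p] = '/' ∧ (some cs[p + 1] : Option Char) = some '*') := by
            simpa using hcd
          rw [if_neg hcond]
          have hBc : ¬ (cs[p] = '/' ∧ (cs.drop (p + 1)).head? = some '*') := by
            rw [hd2]
            simp only [List.head?_cons, Option.some.injEq]
            exact fun h => hcd ⟨h.1, h.2⟩
          by_cases hq : cs[p] = '\'' ∨ cs[p] = '"'
          · rw [if_pos hq]
            have hadv : pvAdvancePastString cs (p : Int) (cs.length : Int)
                = pvStrLoop cs cs[p] (cs.length : Int) ((p + 1 : Nat) : Int) := by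
              unfold pvAdvancePastString
              rw [hgd, show ((p : Int) + 1) = ((p + 1 : Nat) : Int) from by push_cast; ring]
            have hb := pvStrLoop_bounds cs cs[p] cs.length ((p + 1 : Nat) : Int) (by omega)
            set r := pvStrLoop cs cs[p] (cs.length : Int) ((p + 1 : Nat) : Int) with hrdef
            have hr1 : (p : Int) + 1 ≤ r := by
              rcases hb.2 with h | h
              · push_cast at h; omega
              · omega
            have hrL : r ≤ (cs.length : Int) := hb.1
            have hrn : ((r.toNat : Nat) : Int) = r := by omega
            have hA' : pvALoop cs (cs.length : Int) fuel dp db r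
                = pvBLoop (cs.drop r.toNat) r dp db .normal := by
              conv_lhs => rw [← hrn]
              rw [ih r.toNat dp db (by omega) (by omega), hrn]
            have ec : ((p + 1 : Nat) : Int) = (p : Int) + 1 := by push_cast; ring
            have hB1 : pvBLoop (cs.drop p) (p : Int) dp db .normal
                = pvBLoop (cs.drop (p + 1)) ((p + 1 : Nat) : Int) dp db (.instring cs[p] false) := by
              have hBc2 : ¬ (cs[p] = '/' ∧ cs[p + 1]? = some '*') := by
                rw [← List.head?_drop]; exact hBc
              rw [hd, pvBLoop.eq_def, ec]
              simp [hBc2, hq, List.head?_drop]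
            have hB2 := pvString_lemma cs cs[p] cs.length (p + 1) dp db (by omega) (by omega)
            rw [hadv, hA', hB1, hB2]
          · rw [if_neg hq]
            conv_rhs => rw [hd, pvBLoop.eq_def]
            simp only [if_neg hBc, if_neg hq]
            split_ifs <;>
              first
                | rfl
                | (rw [show ((p : Int) + 1) = ((p + 1 : Nat) : Int) from by push_cast; ring]
                   exact ih (p + 1) _ _ (by omega) (by omega))
      · have hp1' : ¬ ((p : Int) + 1 < (cs.length : Int)) := by
          intro h; exact hp1 (by exact_mod_cast h)
        simp only [if_neg hp1']
        have hcond : ¬ (cs[p] = '/' ∧ (none : Option Char) = some '*') := by simp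
        rw [if_neg hcond]
        have hnil : cs.drop (p + 1) = [] := List.drop_eq_nil_of_le (by omega)
        have hBc : ¬ (cs[p] = '/' ∧ (cs.drop (p + 1)).head? = some '*') := by
          rw [hnil]; simp
        by_cases hq : cs[p] = '\'' ∨ cs[p] = '"'
        · rw [if_pos hq]
          have hadv : pvAdvancePastString cs (p : Int) (cs.length : Int)
              = pvStrLoop cs cs[p] (cs.length : Int) ((p + 1 : Nat) : Int) := by
            unfold pvAdvancePastString
            rw [hgd, show ((p : Int) + 1) = ((p + 1 : Nat) : Int) from by push_cast; ring]
          have hb := pvStrLoop_bounds cs cs[p] cs.length ((p + 1 : Nat) : Int) (by omega)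
          set r := pvStrLoop cs cs[p] (cs.length : Int) ((p + 1 : Nat) : Int) with hrdef
          have hr1 : (p : Int) + 1 ≤ r := by
            rcases hb.2 with h | h
            · push_cast at h; omega
            · omega
          have hrL : r ≤ (cs.length : Int) := hb.1
          have hrn : ((r.toNat : Nat) : Int) = r := by omega
          have hA' : pvALoop cs (cs.length : Int) fuel dp db r
              = pvBLoop (cs.drop r.toNat) r dp db .normal := by
            conv_lhs => rw [← hrn]
            rw [ih r.toNat dp db (by omega) (by omega), hrn]
          have ec : ((p + 1 : Nat) : Int) = (p : Int) + 1 := by push_cast; ring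
          have hB1 : pvBLoop (cs.drop p) (p : Int) dp db .normal
              = pvBLoop (cs.drop (p + 1)) ((p + 1 : Nat) : Int) dp db (.instring cs[p] false) := by
            have hBc2 : ¬ (cs[p] = '/' ∧ cs[p + 1]? = some '*') := by
              rw [← List.head?_drop]; exact hBc
            rw [hd, pvBLoop.eq_def, ec]
            simp [hBc2, hq, List.head?_drop]
          have hB2 := pvString_lemma cs cs[p] cs.length (p + 1) dp db (by omega) (by omega)
          rw [hadv, hA', hB1, hB2]
        · rw [if_neg hq]
          conv_rhs => rw [hd, pvBLoop.eq_def]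
          simp only [if_neg hBc, if_neg hq]
          split_ifs <;>
            first
              | rfl
              | (rw [show ((p : Int) + 1) = ((p + 1 : Nat) : Int) from by push_cast; ring]
                 exact ih (p + 1) _ _ (by omega) (by omega))

-- ===== VERDICT (by name: the statement is the Claim_ definition above) =====
theorem find_top_level_colon_py_spec : Claim_equal_find_top_level_colon_py := by
  intro text _
  unfold Spec_find_top_level_colon_py find_top_level_colon_py find_top_level_colon_py_alt
  have h := pvMain_lemma text.toList (text.toList.length + 1) 0 0 0 (by omega) (by omega)
  simpa using h
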